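-- pv_equiv track=rewrite | github.com/ianmnz/adventofcode | src/y2025/d10.py | bfs
-- ===== SOURCE A (Python) =====
-- from collections import deque
-- from collections.abc import Iterable
--
-- def bfs(target: int, adjacency: Iterable[int], source: int = 0) -> int:
--     q: deque[tuple[int, int]] = deque()
--     visited: set[int] = set()
--
--     q.append((0, source))
--     while q:
--         depth, curr = q.popleft()
--
--         if curr in visited:
--             continue
--
--         visited.add(curr)
--
--         for adj in adjacency:
--             next = curr ^ adj
--
--             # Early return if target will be reached
--             # on next state
--             if next == target:
--                 return depth + 1
--
--             if next not in visited:
--                 q.append((depth + 1, next))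
--
--     return -1
-- ===== SOURCE B (Python) =====
-- def bfs(target: int, adjacency, source: int = 0) -> int:
--     # Algebraic reformulation instead of a graph search: the answer only depends on
--     # t = target ^ source and the set of generators.  Iterate the exact-depth
--     # XOR-walk value sets S_d (S_0 = {0}, S_{d+1} = {x ^ g : x in S_d, g in gens})
--     # and return the first d with t in S_d.  No queue and no visited set: since
--     # S_d is a subset of S_{d+2}, the sequence becomes 2-periodic; detecting
--     # S_{d+1} == S_{d-1} proves unreachability, so return -1 there.
--     gens = set(adjacency)
--     if not gens:
--         return -1
--     t = target ^ source
--     prev = None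
--     cur = {0}
--     d = 0
--     while True:
--         nxt = {x ^ g for x in cur for g in gens}
--         d += 1
--         if t in nxt:
--             return d
--         if nxt == prev:
--             return -1
--         prev, cur = cur, nxt
-- ===== Notes on version B (the rewrite author's own statement) =====
-- stated objective: alternative
-- what changed: Replaces the FIFO-queue graph BFS with a visited set and per-edge early return by an algebraic iteration: dedup the generators, translate to t = target ^ source, iterate the exact-depth XOR-walk value sets S_d (S_0={0}, S_{d+1}={x^g}), return the first d with t in S_d, and detect unreachability by the 2-periodicity fixpoint S_{d+1} == S_{d-1} - no queue, no visited set, no per-node bookkeeping.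
import Mathlib
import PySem

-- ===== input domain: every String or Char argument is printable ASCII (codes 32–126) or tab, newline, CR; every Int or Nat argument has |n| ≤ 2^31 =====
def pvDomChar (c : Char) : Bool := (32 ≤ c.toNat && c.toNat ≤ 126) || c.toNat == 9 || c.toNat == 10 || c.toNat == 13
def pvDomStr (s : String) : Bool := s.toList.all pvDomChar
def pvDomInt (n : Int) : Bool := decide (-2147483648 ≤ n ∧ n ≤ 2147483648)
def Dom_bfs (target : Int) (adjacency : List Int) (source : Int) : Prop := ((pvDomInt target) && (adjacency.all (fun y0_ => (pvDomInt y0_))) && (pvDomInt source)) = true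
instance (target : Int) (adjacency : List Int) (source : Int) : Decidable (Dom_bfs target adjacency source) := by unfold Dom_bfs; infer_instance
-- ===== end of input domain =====

-- B replaces A's FIFO-queue graph BFS (visited set, per-edge early return) by an algebraic
-- iteration of the exact-depth XOR-walk value sets of the translated problem t = target ^ source,
-- with unreachability detected by a 2-periodicity fixpoint; same return value, proved on Dom_bfs.

-- ===== PORT A =====
-- A's inner `for adj in adjacency` loop: first hit of target returns depth+1 (Sum.inl),
-- otherwise it collects the unvisited (depth+1, next) pairs to append to the queue.
def scanA (target : Int) (vis : PySem.Set Int) (depth curr : Int) : List Int → Sum Int (List (Int × Int))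
  | [] => Sum.inr []
  | adj :: rest =>
    let nxt := PySem.Int.bxor curr adj
    if nxt = target then Sum.inl (depth + 1)
    else
      match scanA target vis depth curr rest with
      | Sum.inl v => Sum.inl v
      | Sum.inr l => if PySem.Set.contains vis nxt then Sum.inr l else Sum.inr ((depth + 1, nxt) :: l)

-- A's `while q` loop; the fuel only makes the recursion total and is provably never exhausted on Dom_bfs.
def loopA (target : Int) (adjacency : List Int) : Nat → List (Int × Int) → PySem.Set Int → Int
  | _, [], _ => -1
  | 0, _ :: _, _ => -1
  | fuel + 1, (depth, curr) :: rest, vis =>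
    if PySem.Set.contains vis curr then loopA target adjacency fuel rest vis
    else
      match scanA target (PySem.Set.add vis curr) depth curr adjacency with
      | Sum.inl v => v
      | Sum.inr ps => loopA target adjacency fuel (rest ++ ps) (PySem.Set.add vis curr)

def bfs (target : Int) (adjacency : List Int) (source : Int) : Int :=
  loopA target adjacency (2 ^ 33 * (adjacency.length + 1) + 1) [((0 : Int), source)] PySem.Set.empty

-- ===== PORT B =====
-- B's set comprehension `{x ^ g for x in cur for g in gens}`.
def nextSet (gens : PySem.Set Int) (cur : PySem.Set Int) : PySem.Set Int :=
  PySem.Set.ofList (cur.flatMap (fun x => gens.map (fun g => PySem.Int.bxor x g)))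

-- B's `while True` loop; fuel only for totality, provably never exhausted on Dom_bfs.
def loopB (t : Int) (gens : PySem.Set Int) : Nat → Option (PySem.Set Int) → PySem.Set Int → Int → Int
  | 0, _, _, _ => -1
  | fuel + 1, prev, cur, d =>
    let nxt := nextSet gens cur
    if PySem.Set.contains nxt t then d + 1
    else if (match prev with | some p => PySem.Set.equal nxt p | none => false) then -1
    else loopB t gens fuel (some cur) nxt (d + 1)

def bfs_alt (target : Int) (adjacency : List Int) (source : Int) : Int :=
  let gens := PySem.Set.ofList adjacency
  if gens = [] then -1
  else loopB (PySem.Int.bxor target source) gens (2 ^ 34 + 4) none (PySem.Set.ofList [0]) 0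

-- ===== PRECONDITION & SPEC =====
def Spec_bfs (target : Int) (adjacency : List Int) (source : Int) (out : Int) : Prop := out = bfs_alt target adjacency source
instance (target : Int) (adjacency : List Int) (source : Int) (out : Int) : Decidable (Spec_bfs target adjacency source out) := by unfold Spec_bfs; infer_instance

-- ===== CLAIM (what is proved, stated in full; the proofs are below) =====
def Claim_equal_bfs : Prop := ∀ (target : Int) (adjacency : List Int) (source : Int), Dom_bfs target adjacency source → Spec_bfs target adjacency source (bfs target adjacency source)

-- ===== LEMMAS AND PROOFS =====

-- ---- the level-synchronous intermediate form of A's loop (proof-internal only) ----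
-- scanM is scanA without the depth tags; levelGo/loopM process A's queue level by level.
def scanM (target : Int) (vis : PySem.Set Int) (depth curr : Int) : List Int → Sum Int (List Int)
  | [] => Sum.inr []
  | adj :: rest =>
    let nxt := PySem.Int.bxor curr adj
    if nxt = target then Sum.inl (depth + 1)
    else
      match scanM target vis depth curr rest with
      | Sum.inl v => Sum.inl v
      | Sum.inr l => if PySem.Set.contains vis nxt then Sum.inr l else Sum.inr (nxt :: l)

def levelGo (target : Int) (adjacency : List Int) (depth : Int) :
    List Int → PySem.Set Int → List Int → Sum Int (PySem.Set Int × List Int)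
  | [], vis, acc => Sum.inr (vis, acc)
  | c :: rest, vis, acc =>
    if PySem.Set.contains vis c then levelGo target adjacency depth rest vis acc
    else
      match scanM target (PySem.Set.add vis c) depth c adjacency with
      | Sum.inl v => Sum.inl v
      | Sum.inr xs => levelGo target adjacency depth rest (PySem.Set.add vis c) (acc ++ xs)

def loopM (target : Int) (adjacency : List Int) : Nat → List Int → PySem.Set Int → Int → Int
  | _, [], _, _ => -1
  | 0, _ :: _, _, _ => -1
  | fuel + 1, c :: rest, vis, depth =>
    match levelGo target adjacency depth (c :: rest) vis [] with
    | Sum.inl v => v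
    | Sum.inr (vis', nxt) => loopM target adjacency fuel nxt vis' (depth + 1)

-- ---- 33-bit window, potential (from the A ↔ level-form simulation) ----
def In32 (x : Int) : Prop := -(2 ^ 32) ≤ x ∧ x < 2 ^ 32

theorem in32_bxor {a b : Int} (ha : In32 a) (hb : In32 b) : In32 (PySem.Int.bxor a b) := by
  obtain ⟨ha1, ha2⟩ := ha
  obtain ⟨hb1, hb2⟩ := hb
  unfold PySem.Int.bxor
  constructor <;> split_ifs <;> rename_i h1 h2
  all_goals
    first
    | (have hx : a.toNat ^^^ b.toNat < 2 ^ 32 := Nat.xor_lt_two_pow (by omega) (by omega); omega)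
    | (have hx : a.toNat ^^^ (-b - 1).toNat < 2 ^ 32 := Nat.xor_lt_two_pow (by omega) (by omega); omega)
    | (have hx : (-a - 1).toNat ^^^ b.toNat < 2 ^ 32 := Nat.xor_lt_two_pow (by omega) (by omega); omega)
    | (have hx : (-a - 1).toNat ^^^ (-b - 1).toNat < 2 ^ 32 := Nat.xor_lt_two_pow (by omega) (by omega); omega)

noncomputable def cnt (vis : List Int) : Nat :=
  ((Finset.Icc (-(2 ^ 32) : Int) (2 ^ 32 - 1)).filter (fun x => x ∉ vis)).card

theorem in32_mem_Icc {x : Int} : In32 x ↔ x ∈ Finset.Icc (-(2 ^ 32) : Int) (2 ^ 32 - 1) := by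
  simp [In32, Finset.mem_Icc]; omega

theorem cnt_le (vis : List Int) : cnt vis ≤ 2 ^ 33 := by
  calc cnt vis ≤ (Finset.Icc (-(2 ^ 32) : Int) (2 ^ 32 - 1)).card := Finset.card_filter_le _ _
    _ = 2 ^ 33 := by rw [Int.card_Icc]; norm_num; rfl

theorem cnt_add {vis : List Int} {c : Int} (hc : In32 c) (hnc : c ∉ vis) :
    cnt (PySem.Set.add vis c) + 1 = cnt vis := by
  have hadd : PySem.Set.add vis c = vis ++ [c] := PySem.Set.add_of_not_mem hnc
  have hfil : ((Finset.Icc (-(2 ^ 32) : Int) (2 ^ 32 - 1)).filter (fun x => x ∉ vis ++ [c]))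
      = ((Finset.Icc (-(2 ^ 32) : Int) (2 ^ 32 - 1)).filter (fun x => x ∉ vis)).erase c := by
    ext x
    simp [Finset.mem_erase, List.mem_append]
    tauto
  have hmem : c ∈ (Finset.Icc (-(2 ^ 32) : Int) (2 ^ 32 - 1)).filter (fun x => x ∉ vis) := by
    exact Finset.mem_filter.mpr ⟨in32_mem_Icc.mp hc, hnc⟩
  unfold cnt
  rw [hadd, hfil]
  exact Finset.card_erase_add_one hmem

theorem nodup_in32_length {l : List Int} (hnd : l.Nodup) (h32 : ∀ x ∈ l, In32 x) :
    l.length ≤ 2 ^ 33 := by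
  have hsub : l.toFinset ⊆ Finset.Icc (-(2 ^ 32) : Int) (2 ^ 32 - 1) := by
    intro x hx
    exact in32_mem_Icc.mp (h32 x (List.mem_toFinset.mp hx))
  have h1 : l.toFinset.card = l.length := List.toFinset_card_of_nodup hnd
  have h2 := Finset.card_le_card hsub
  rw [h1] at h2
  calc l.length ≤ (Finset.Icc (-(2 ^ 32) : Int) (2 ^ 32 - 1)).card := h2
    _ = 2 ^ 33 := by rw [Int.card_Icc]; norm_num; rfl

-- ---- A ↔ level form: simulation lemmas ----
theorem scanA_eq_scanM (target : Int) (vis : PySem.Set Int) (depth curr : Int) (l : List Int) :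
    scanA target vis depth curr l =
      (match scanM target vis depth curr l with
       | Sum.inl v => Sum.inl v
       | Sum.inr xs => Sum.inr (xs.map (fun x => (depth + 1, x)))) := by
  induction l with
  | nil => simp [scanA, scanM]
  | cons adj rest ih =>
    simp only [scanA, scanM]
    split_ifs with h h2
    · rfl
    all_goals rw [ih]; rcases hsb : scanM target vis depth curr rest with v | xs <;> rfl

theorem scanM_length {target : Int} {vis : PySem.Set Int} {depth curr : Int} {l : List Int} {xs : List Int}
    (h : scanM target vis depth curr l = Sum.inr xs) : xs.length ≤ l.length := by
  induction l generalizing xs with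
  | nil => simp only [scanM] at h; injection h with h; subst h; simp
  | cons adj rest ih =>
    simp only [scanM] at h
    split at h
    · simp at h
    · split at h
      · simp at h
      · rename_i ys hsb
        split at h
        · injection h with h; subst h
          have := ih hsb; simp; omega
        · injection h with h; subst h
          have := ih hsb; simp; omega

theorem scanM_mem {target : Int} {vis : PySem.Set Int} {depth curr : Int} {l : List Int} {xs : List Int}
    (h : scanM target vis depth curr l = Sum.inr xs) :
    ∀ x ∈ xs, ∃ a ∈ l, x = PySem.Int.bxor curr a := by
  induction l generalizing xs with
  | nil => simp only [scanM] at h; injection h with h; subst h; simp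
  | cons adj rest ih =>
    simp only [scanM] at h
    split at h
    · simp at h
    · split at h
      · simp at h
      · rename_i ys hsb
        split at h
        · injection h with h; subst h
          intro x hx
          obtain ⟨a, ha, rfl⟩ := ih hsb x hx
          exact ⟨a, by simp [ha], rfl⟩
        · injection h with h; subst h
          intro x hx
          rcases List.mem_cons.mp hx with rfl | hx'
          · exact ⟨adj, by simp, rfl⟩
          · obtain ⟨a, ha, rfl⟩ := ih hsb x hx'
            exact ⟨a, by simp [ha], rfl⟩

theorem levelGo_inr {target : Int} {adjacency : List Int} {depth : Int}
    (front : List Int) :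
    ∀ (vis : PySem.Set Int) (acc : List Int) (vis' : PySem.Set Int) (nxt : List Int),
    (∀ x ∈ front, In32 x) → (∀ a ∈ adjacency, In32 a) → (∀ x ∈ acc, In32 x) →
    levelGo target adjacency depth front vis acc = Sum.inr (vis', nxt) →
      (∀ x ∈ nxt, In32 x) ∧
      nxt.length + cnt vis' * (adjacency.length + 1) ≤ acc.length + cnt vis * (adjacency.length + 1) ∧
      (cnt vis' < cnt vis ∨ (vis' = vis ∧ nxt = acc)) := by
  induction front with
  | nil =>
    intro vis acc vis' nxt _ _ hacc h
    simp [levelGo] at h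
    obtain ⟨rfl, rfl⟩ := h
    exact ⟨hacc, le_refl _, Or.inr ⟨rfl, rfl⟩⟩
  | cons c rest ih =>
    intro vis acc vis' nxt hf hadj hacc h
    simp only [levelGo] at h
    split_ifs at h with hvc
    · exact ih vis acc vis' nxt (fun x hx => hf x (by simp [hx])) hadj hacc h
    · rcases hsb : scanM target (PySem.Set.add vis c) depth c adjacency with v | xs <;>
        rw [hsb] at h <;> dsimp only at h
      · simp at h
      ·
        have hcIn : In32 c := hf c (by simp)
        have hcnv : c ∉ vis := by
          intro hm
          exact hvc ((PySem.Set.contains_iff _ _).mpr hm)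
        have hcnt : cnt (PySem.Set.add vis c) + 1 = cnt vis := cnt_add hcIn hcnv
        have hxsIn : ∀ x ∈ acc ++ xs, In32 x := by
          intro x hx
          rcases List.mem_append.mp hx with hx | hx
          · exact hacc x hx
          · obtain ⟨a, ha, rfl⟩ := scanM_mem hsb x hx
            exact in32_bxor hcIn (hadj a ha)
        have hxlen : xs.length ≤ adjacency.length := scanM_length hsb
        obtain ⟨h1, h2, h3⟩ := ih (PySem.Set.add vis c) (acc ++ xs) vis' nxt
          (fun x hx => hf x (by simp [hx])) hadj hxsIn h
        refine ⟨h1, ?_, ?_⟩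
        · have hrw : cnt vis * (adjacency.length + 1)
              = cnt (PySem.Set.add vis c) * (adjacency.length + 1) + (adjacency.length + 1) := by
            rw [← hcnt]; ring
          rw [hrw]
          have := h2
          simp only [List.length_append] at this
          omega
        · left
          rcases h3 with h3 | ⟨rfl, _⟩
          · omega
          · omega

theorem loopA_level (target : Int) (adjacency : List Int) (depth : Int) (front : List Int) :
    ∀ (vis : PySem.Set Int) (next : List Int) (fA : Nat),
    loopA target adjacency (front.length + fA)
        (front.map (fun c => (depth, c)) ++ next.map (fun c => (depth + 1, c))) vis =
      (match levelGo target adjacency depth front vis next with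
       | Sum.inl v => v
       | Sum.inr (vis', nxt) => loopA target adjacency fA (nxt.map (fun c => (depth + 1, c))) vis') := by
  induction front with
  | nil =>
    intro vis next fA
    simp [levelGo]
  | cons c rest ih =>
    intro vis next fA
    have hfuel : (c :: rest).length + fA = (rest.length + fA) + 1 := by simp; omega
    rw [hfuel]
    simp only [List.map_cons, List.cons_append, loopA, levelGo]
    split_ifs with hvc
    · exact ih vis next fA
    · rw [scanA_eq_scanM]
      rcases hsb : scanM target (PySem.Set.add vis c) depth c adjacency with v | xs <;> dsimp only
      have hq : (rest.map (fun c => (depth, c)) ++ next.map (fun c => (depth + 1, c)))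
              ++ xs.map (fun x => (depth + 1, x))
            = rest.map (fun c => (depth, c)) ++ (next ++ xs).map (fun c => (depth + 1, c)) := by
        simp [List.append_assoc]
      rw [hq]
      exact ih (PySem.Set.add vis c) (next ++ xs) fA

theorem loopA_nil (target : Int) (adjacency : List Int) (fuel : Nat) (vis : PySem.Set Int) :
    loopA target adjacency fuel [] vis = -1 := by
  cases fuel <;> rfl

theorem loopM_nil (target : Int) (adjacency : List Int) (fuel : Nat) (vis : PySem.Set Int) (depth : Int) :
    loopM target adjacency fuel [] vis depth = -1 := by
  cases fuel <;> rfl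

set_option maxRecDepth 4096 in
theorem loopA_eq_loopM (target : Int) (adjacency : List Int)
    (hadj : ∀ a ∈ adjacency, In32 a) :
    ∀ (fB : Nat) (front : List Int) (vis : PySem.Set Int) (depth : Int) (fA : Nat),
    (∀ x ∈ front, In32 x) →
    front.length + cnt vis * (adjacency.length + 1) ≤ fA →
    cnt vis < fB →
    loopA target adjacency fA (front.map (fun c => (depth, c))) vis =
      loopM target adjacency fB front vis depth := by
  intro fB
  induction fB with
  | zero => intro front vis depth fA _ _ hB; omega
  | succ fB ih =>
    intro front vis depth fA hf hA hB
    rcases front with _ | ⟨c, rest⟩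
    · simp only [List.map_nil]
      rw [loopA_nil, loopM_nil]
    · obtain ⟨fA', rfl⟩ : ∃ fA', fA = (c :: rest).length + fA' :=
        ⟨fA - (c :: rest).length, by simp at hA ⊢; omega⟩
      have hmap : ((c :: rest).map (fun x => (depth, x)))
          = (c :: rest).map (fun x => (depth, x)) ++ ([] : List Int).map (fun x => (depth + 1, x)) := by
        simp
      rw [hmap, loopA_level]
      simp only [loopM]
      rcases hlg : levelGo target adjacency depth (c :: rest) vis [] with v | ⟨vis', nxt⟩ <;> dsimp only
      obtain ⟨h1, h2, h3⟩ := levelGo_inr (c :: rest) vis [] vis' nxt hf hadj (by simp) hlg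
      rcases h3 with h3 | ⟨rfl, rfl⟩
      · apply ih nxt vis' (depth + 1) fA' h1
        · simp only [List.length_nil, Nat.zero_add] at h2
          simp at hA
          omega
        · omega
      · simp only [List.map_nil]
        rw [loopA_nil, loopM_nil]

theorem dom_in32 {n : Int} (h : pvDomInt n = true) : In32 n := by
  simp [pvDomInt] at h
  constructor <;> omega

-- ---- xor algebra for PySem.Int.bxor ----
def pvMag (a : Int) : Nat := if 0 ≤ a then a.toNat else (-a - 1).toNat
def pvNeg (a : Int) : Bool := decide (a < 0)
def pvDec (s : Bool) (m : Nat) : Int := if s then -(m : Int) - 1 else (m : Int)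

theorem bxor_eq_dec (a b : Int) :
    PySem.Int.bxor a b = pvDec (pvNeg a != pvNeg b) (pvMag a ^^^ pvMag b) := by
  unfold PySem.Int.bxor pvDec pvNeg pvMag
  by_cases ha : 0 ≤ a <;> by_cases hb : 0 ≤ b
  · rw [if_pos ha, if_pos hb, if_pos ha, if_pos hb]
    simp [not_lt.mpr ha, not_lt.mpr hb]
  · rw [if_pos ha, if_neg hb, if_pos ha, if_neg hb]
    simp [not_lt.mpr ha, lt_of_not_ge hb]
  · rw [if_neg ha, if_pos hb, if_neg ha, if_pos hb]
    simp [lt_of_not_ge ha, not_lt.mpr hb]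
  · rw [if_neg ha, if_neg hb, if_neg ha, if_neg hb]
    simp [lt_of_not_ge ha, lt_of_not_ge hb]

theorem pvMag_dec (s : Bool) (m : Nat) : pvMag (pvDec s m) = m := by
  cases s <;> simp [pvDec, pvMag] <;> omega

theorem pvNeg_dec (s : Bool) (m : Nat) : pvNeg (pvDec s m) = s := by
  cases s <;> simp [pvDec, pvNeg] <;> omega

theorem bxor_assoc (a b c : Int) :
    PySem.Int.bxor (PySem.Int.bxor a b) c = PySem.Int.bxor a (PySem.Int.bxor b c) := by
  rw [bxor_eq_dec a b, bxor_eq_dec b c, bxor_eq_dec (pvDec _ _) c, bxor_eq_dec a (pvDec _ _),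
    pvMag_dec, pvNeg_dec, pvMag_dec, pvNeg_dec]
  cases pvNeg a <;> cases pvNeg b <;> cases pvNeg c <;> simp [Nat.xor_assoc]

theorem bxor_cancel (a b : Int) : PySem.Int.bxor (PySem.Int.bxor a b) b = a := by
  rw [bxor_assoc, PySem.Int.bxor_self, PySem.Int.bxor_zero]

theorem bxor_zero_left (a : Int) : PySem.Int.bxor 0 a = a := by
  rw [PySem.Int.bxor_comm, PySem.Int.bxor_zero]

theorem bxor_right_comm (a b c : Int) :
    PySem.Int.bxor (PySem.Int.bxor a b) c = PySem.Int.bxor (PySem.Int.bxor a c) b := by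
  rw [bxor_assoc, bxor_assoc, PySem.Int.bxor_comm b c]

-- ---- exact-depth XOR-walk reachability and exact distance ----
def Reach (gens : List Int) (start : Int) : Nat → Int → Prop
  | 0, x => x = start
  | d + 1, x => ∃ y g, Reach gens start d y ∧ g ∈ gens ∧ x = PySem.Int.bxor y g

def DistW (gens : List Int) (start : Int) (n : Nat) (x : Int) : Prop :=
  Reach gens start n x ∧ ∀ m < n, ¬ Reach gens start m x

theorem reach_translate (gens : List Int) (source : Int) :
    ∀ (n : Nat) (u : Int), Reach gens source n u ↔ Reach gens 0 n (PySem.Int.bxor u source) := by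
  intro n
  induction n with
  | zero =>
    intro u
    show u = source ↔ PySem.Int.bxor u source = 0
    constructor
    · rintro rfl
      simp
    · intro h0
      have h1 := congrArg (fun z => PySem.Int.bxor z source) h0
      simpa [bxor_cancel, bxor_zero_left] using h1
  | succ d ih =>
    intro u
    constructor
    · rintro ⟨y, g, hy, hg, rfl⟩
      refine ⟨PySem.Int.bxor y source, g, (ih y).mp hy, hg, ?_⟩
      rw [bxor_right_comm]
    · rintro ⟨z, g, hz, hg, hu⟩
      refine ⟨PySem.Int.bxor z source, g, (ih _).mpr ?_, hg, ?_⟩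
      · rw [bxor_cancel]
        exact hz
      · have h2 : u = PySem.Int.bxor (PySem.Int.bxor u source) source := (bxor_cancel u source).symm
        rw [h2, hu, bxor_right_comm]

theorem reach_succ_succ {gens : List Int} {start : Int} {g0 : Int} (hg : g0 ∈ gens) :
    ∀ {n : Nat} {x : Int}, Reach gens start n x → Reach gens start (n + 2) x := by
  intro n x h
  exact ⟨PySem.Int.bxor x g0, g0, ⟨x, g0, h, hg, rfl⟩, hg, (bxor_cancel x g0).symm⟩

theorem reach_period {gens : List Int} {start : Int} {m : Nat}
    (h : ∀ x, Reach gens start (m + 2) x ↔ Reach gens start m x) :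
    ∀ (k : Nat) (x : Int), Reach gens start (m + 2 + k) x ↔ Reach gens start (m + k) x := by
  intro k
  induction k with
  | zero => exact h
  | succ k ih =>
    intro x
    show (∃ y g, Reach gens start (m + 2 + k) y ∧ g ∈ gens ∧ x = PySem.Int.bxor y g)
        ↔ (∃ y g, Reach gens start (m + k) y ∧ g ∈ gens ∧ x = PySem.Int.bxor y g)
    exact exists_congr fun y => exists_congr fun g => and_congr_left fun _ => ih y

theorem reach_descend {gens : List Int} {start : Int} {m : Nat}
    (h : ∀ x, Reach gens start (m + 2) x ↔ Reach gens start m x) :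
    ∀ (n : Nat) (x : Int), m ≤ n → Reach gens start n x →
      Reach gens start m x ∨ Reach gens start (m + 1) x := by
  intro n
  induction n using Nat.strong_induction_on with
  | _ n ih =>
    intro x hmn hx
    by_cases hsmall : n ≤ m + 1
    · rcases (by omega : n = m ∨ n = m + 1) with rfl | rfl
      · exact Or.inl hx
      · exact Or.inr hx
    · have hrw : m + 2 + (n - 2 - m) = n := by omega
      have hx2 : Reach gens start (m + 2 + (n - 2 - m)) x := by rw [hrw]; exact hx
      have hx' : Reach gens start (m + (n - 2 - m)) x := (reach_period h (n - 2 - m) x).mp hx2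
      have hrw2 : m + (n - 2 - m) = n - 2 := by omega
      rw [hrw2] at hx'
      exact ih (n - 2) (by omega) x (by omega) hx'

theorem exists_dist {gens : List Int} {start : Int} :
    ∀ (n : Nat) (y : Int), Reach gens start n y → ∃ m ≤ n, DistW gens start m y := by
  intro n
  induction n using Nat.strong_induction_on with
  | _ n ih =>
    intro y hy
    by_cases hall : ∀ m < n, ¬ Reach gens start m y
    · exact ⟨n, le_refl n, hy, hall⟩
    · push_neg at hall
      obtain ⟨m, hm, hr⟩ := hall
      obtain ⟨m', hm', hd⟩ := ih m hm y hr
      exact ⟨m', by omega, hd⟩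

theorem dist_pred {gens : List Int} {start : Int} {n : Nat} {w : Int}
    (h : DistW gens start (n + 1) w) :
    ∃ y g, DistW gens start n y ∧ g ∈ gens ∧ w = PySem.Int.bxor y g := by
  obtain ⟨⟨y, g, hy, hg, rfl⟩, hmin⟩ := h
  obtain ⟨m, hm, hdy⟩ := exists_dist _ y hy
  rcases Nat.lt_or_ge m n with hlt | hge
  · exact absurd (⟨y, g, hdy.1, hg, rfl⟩ : Reach gens start (m + 1) _) (hmin (m + 1) (by omega))
  · have heq : m = n := le_antisymm hm hge
    subst heq
    exact ⟨y, g, hdy, hg, rfl⟩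

theorem reach_in32 {gens : List Int} (h32 : ∀ g ∈ gens, In32 g) :
    ∀ (n : Nat) (x : Int), Reach gens 0 n x → In32 x := by
  intro n
  induction n with
  | zero =>
    intro x hx
    rw [show x = 0 from hx]
    exact ⟨by norm_num, by norm_num⟩
  | succ d ih =>
    rintro x ⟨y, g, hy, hg, rfl⟩
    exact in32_bxor (ih y hy) (h32 g hg)

-- ---- scanM characterization ----
theorem scanM_inl {target : Int} {vis : PySem.Set Int} {depth curr : Int} {l : List Int} {v : Int}
    (h : scanM target vis depth curr l = Sum.inl v) :
    v = depth + 1 ∧ ∃ g ∈ l, PySem.Int.bxor curr g = target := by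
  induction l generalizing v with
  | nil => simp [scanM] at h
  | cons adj rest ih =>
    simp only [scanM] at h
    split at h
    · rename_i heq
      injection h with h
      exact ⟨h.symm, adj, by simp, heq⟩
    · split at h
      · rename_i v' hsb
        injection h with h
        subst h
        obtain ⟨h1, g, hgl, hgt⟩ := ih hsb
        exact ⟨h1, g, List.mem_cons_of_mem _ hgl, hgt⟩
      · split at h <;> simp at h

theorem scanM_inr_nohit {target : Int} {vis : PySem.Set Int} {depth curr : Int} {l : List Int} {xs : List Int}
    (h : scanM target vis depth curr l = Sum.inr xs) :
    ∀ g ∈ l, PySem.Int.bxor curr g ≠ target := by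
  induction l generalizing xs with
  | nil => simp
  | cons adj rest ih =>
    simp only [scanM] at h
    split at h
    · simp at h
    · rename_i hne
      split at h
      · simp at h
      · rename_i ys hsb
        intro g hg
        rcases List.mem_cons.mp hg with rfl | hg'
        · exact hne
        · exact ih hsb g hg'

theorem scanM_inr_collect {target : Int} {vis : PySem.Set Int} {depth curr : Int} {l : List Int} {xs : List Int}
    (h : scanM target vis depth curr l = Sum.inr xs) :
    ∀ g ∈ l, ¬ PySem.Set.contains vis (PySem.Int.bxor curr g) = true → PySem.Int.bxor curr g ∈ xs := by
  induction l generalizing xs with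
  | nil => simp
  | cons adj rest ih =>
    simp only [scanM] at h
    split at h
    · simp at h
    · split at h
      · simp at h
      · rename_i ys hsb
        intro g hg hnc
        rcases List.mem_cons.mp hg with rfl | hg'
        · split at h
          · rename_i hc
            exact absurd hc hnc
          · injection h with h
            subst h
            exact List.mem_cons_self
        · have hmem := ih hsb g hg' hnc
          split at h <;> injection h with h <;> subst h
          · exact hmem
          · exact List.mem_cons_of_mem _ hmem

-- ---- levelGo characterization ----
theorem levelGo_inl_char {target : Int} {adjacency : List Int} {depth : Int} :
    ∀ (front : List Int) (vis : PySem.Set Int) (acc : List Int) (v : Int),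
    levelGo target adjacency depth front vis acc = Sum.inl v →
    v = depth + 1 ∧ ∃ y ∈ front, ∃ g ∈ adjacency, PySem.Int.bxor y g = target := by
  intro front
  induction front with
  | nil => intro vis acc v h; simp [levelGo] at h
  | cons c rest ih =>
    intro vis acc v h
    simp only [levelGo] at h
    split_ifs at h with hvc
    · obtain ⟨h1, y, hy, hrest⟩ := ih _ _ _ h
      exact ⟨h1, y, List.mem_cons_of_mem _ hy, hrest⟩
    · rcases hsb : scanM target (PySem.Set.add vis c) depth c adjacency with v' | xs <;>
        rw [hsb] at h <;> dsimp only at h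
      · injection h with h
        subst h
        obtain ⟨hv, g, hg, hgt⟩ := scanM_inl hsb
        exact ⟨hv, c, by simp, g, hg, hgt⟩
      · obtain ⟨h1, y, hy, hrest⟩ := ih _ _ _ h
        exact ⟨h1, y, List.mem_cons_of_mem _ hy, hrest⟩

theorem levelGo_inr_vis {target : Int} {adjacency : List Int} {depth : Int} :
    ∀ (front : List Int) (vis : PySem.Set Int) (acc : List Int) (vis' : PySem.Set Int) (nf : List Int),
    levelGo target adjacency depth front vis acc = Sum.inr (vis', nf) →
    ∀ x, x ∈ vis' ↔ (x ∈ vis ∨ x ∈ front) := by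
  intro front
  induction front with
  | nil =>
    intro vis acc vis' nf h x
    simp [levelGo] at h
    obtain ⟨rfl, rfl⟩ := h
    simp
  | cons c rest ih =>
    intro vis acc vis' nf h x
    simp only [levelGo] at h
    split_ifs at h with hvc
    · have hc : c ∈ vis := (PySem.Set.contains_iff _ _).mp hvc
      rw [ih _ _ _ _ h x]
      simp only [List.mem_cons]
      constructor
      · rintro (hx | hx)
        · exact Or.inl hx
        · exact Or.inr (Or.inr hx)
      · rintro (hx | rfl | hx)
        · exact Or.inl hx
        · exact Or.inl hc
        · exact Or.inr hx
    · rcases hsb : scanM target (PySem.Set.add vis c) depth c adjacency with v' | xs <;>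
        rw [hsb] at h <;> dsimp only at h
      · simp at h
      · rw [ih _ _ _ _ h x, PySem.Set.mem_add]
        simp only [List.mem_cons]
        tauto

theorem levelGo_inr_acc {target : Int} {adjacency : List Int} {depth : Int} :
    ∀ (front : List Int) (vis : PySem.Set Int) (acc : List Int) (vis' : PySem.Set Int) (nf : List Int),
    levelGo target adjacency depth front vis acc = Sum.inr (vis', nf) →
    ∀ x ∈ acc, x ∈ nf := by
  intro front
  induction front with
  | nil =>
    intro vis acc vis' nf h x hx
    simp [levelGo] at h
    obtain ⟨rfl, rfl⟩ := h
    exact hx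
  | cons c rest ih =>
    intro vis acc vis' nf h x hx
    simp only [levelGo] at h
    split_ifs at h with hvc
    · exact ih _ _ _ _ h x hx
    · rcases hsb : scanM target (PySem.Set.add vis c) depth c adjacency with v' | xs <;>
        rw [hsb] at h <;> dsimp only at h
      · simp at h
      · exact ih _ _ _ _ h x (List.mem_append_left _ hx)

theorem levelGo_inr_upper {target : Int} {adjacency : List Int} {depth : Int} :
    ∀ (front : List Int) (vis : PySem.Set Int) (acc : List Int) (vis' : PySem.Set Int) (nf : List Int),
    levelGo target adjacency depth front vis acc = Sum.inr (vis', nf) →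
    ∀ x ∈ nf, x ∈ acc ∨ ∃ y ∈ front, ∃ g ∈ adjacency, x = PySem.Int.bxor y g := by
  intro front
  induction front with
  | nil =>
    intro vis acc vis' nf h x hx
    simp [levelGo] at h
    obtain ⟨rfl, rfl⟩ := h
    exact Or.inl hx
  | cons c rest ih =>
    intro vis acc vis' nf h x hx
    simp only [levelGo] at h
    split_ifs at h with hvc
    · rcases ih _ _ _ _ h x hx with hx' | ⟨y, hy, hrest⟩
      · exact Or.inl hx'
      · exact Or.inr ⟨y, List.mem_cons_of_mem _ hy, hrest⟩
    · rcases hsb : scanM target (PySem.Set.add vis c) depth c adjacency with v' | xs <;>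
        rw [hsb] at h <;> dsimp only at h
      · simp at h
      · rcases ih _ _ _ _ h x hx with hx' | ⟨y, hy, hrest⟩
        · rcases List.mem_append.mp hx' with hx'' | hx''
          · exact Or.inl hx''
          · obtain ⟨g, hg, rfl⟩ := scanM_mem hsb x hx''
            exact Or.inr ⟨c, by simp, g, hg, rfl⟩
        · exact Or.inr ⟨y, List.mem_cons_of_mem _ hy, hrest⟩

theorem levelGo_inr_nohit {target : Int} {adjacency : List Int} {depth : Int} :
    ∀ (front : List Int) (vis : PySem.Set Int) (acc : List Int) (vis' : PySem.Set Int) (nf : List Int),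
    levelGo target adjacency depth front vis acc = Sum.inr (vis', nf) →
    ∀ y, y ∈ vis' → y ∉ vis → ∀ g ∈ adjacency, PySem.Int.bxor y g ≠ target := by
  intro front
  induction front with
  | nil =>
    intro vis acc vis' nf h y hy hynv g hg
    simp [levelGo] at h
    obtain ⟨rfl, rfl⟩ := h
    exact absurd hy hynv
  | cons c rest ih =>
    intro vis acc vis' nf h y hy hynv g hg
    simp only [levelGo] at h
    split_ifs at h with hvc
    · exact ih _ _ _ _ h y hy hynv g hg
    · rcases hsb : scanM target (PySem.Set.add vis c) depth c adjacency with v' | xs <;>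
        rw [hsb] at h <;> dsimp only at h
      · simp at h
      · by_cases hyc : y = c
        · subst hyc
          exact scanM_inr_nohit hsb g hg
        · have hynv' : y ∉ PySem.Set.add vis c := by
            rw [PySem.Set.mem_add]
            rintro (hx | rfl)
            · exact hynv hx
            · exact hyc rfl
          exact ih _ _ _ _ h y hy hynv' g hg

theorem levelGo_inr_collect {target : Int} {adjacency : List Int} {depth : Int} (P : Int → Prop) :
    ∀ (front : List Int) (vis : PySem.Set Int) (acc : List Int) (vis' : PySem.Set Int) (nf : List Int),
    (∀ x ∈ vis, P x) → (∀ x ∈ front, P x) →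
    levelGo target adjacency depth front vis acc = Sum.inr (vis', nf) →
    ∀ y, y ∈ vis' → y ∉ vis → ∀ g ∈ adjacency, ¬ P (PySem.Int.bxor y g) → PySem.Int.bxor y g ∈ nf := by
  intro front
  induction front with
  | nil =>
    intro vis acc vis' nf hvisP hfP h y hy hynv g hg hnP
    simp [levelGo] at h
    obtain ⟨rfl, rfl⟩ := h
    exact absurd hy hynv
  | cons c rest ih =>
    intro vis acc vis' nf hvisP hfP h y hy hynv g hg hnP
    simp only [levelGo] at h
    split_ifs at h with hvc
    · exact ih _ _ _ _ hvisP (fun x hx => hfP x (List.mem_cons_of_mem _ hx)) h y hy hynv g hg hnP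
    · rcases hsb : scanM target (PySem.Set.add vis c) depth c adjacency with v' | xs <;>
        rw [hsb] at h <;> dsimp only at h
      · simp at h
      · have hvisP' : ∀ x ∈ PySem.Set.add vis c, P x := by
          intro x hx
          rcases (PySem.Set.mem_add _ _ _).mp hx with hx' | rfl
          · exact hvisP x hx'
          · exact hfP x (by simp)
        by_cases hyc : y = c
        · subst hyc
          have hnc : ¬ PySem.Set.contains (PySem.Set.add vis y) (PySem.Int.bxor y g) = true := by
            intro hc
            exact hnP (hvisP' _ ((PySem.Set.contains_iff _ _).mp hc))
          have hxs : PySem.Int.bxor y g ∈ xs := scanM_inr_collect hsb g hg hnc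
          exact levelGo_inr_acc _ _ _ _ _ h _ (List.mem_append_right _ hxs)
        · have hynv' : y ∉ PySem.Set.add vis c := by
            rw [PySem.Set.mem_add]
            rintro (hx | rfl)
            · exact hynv hx
            · exact hyc rfl
          exact ih _ _ _ _ hvisP' (fun x hx => hfP x (List.mem_cons_of_mem _ hx)) h y hy hynv' g hg hnP

-- ---- loopM vs the walk spec ----
theorem dist_chain {gens : List Int} {start : Int} :
    ∀ (k : Nat) (y : Int), DistW gens start k y → ∀ m ≤ k, ∃ z, DistW gens start m z := by
  intro k
  induction k with
  | zero =>
    intro y hy m hm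
    have : m = 0 := by omega
    subst this
    exact ⟨y, hy⟩
  | succ k ih =>
    intro y hy m hm
    rcases Nat.eq_or_lt_of_le hm with heq | hlt
    · exact heq ▸ ⟨y, hy⟩
    · obtain ⟨z, g, hz, _, _⟩ := dist_pred hy
      exact ih z hz m (by omega)

theorem loopM_reach {target : Int} {adjacency : List Int} {source : Int} {D : Nat}
    (hD1 : 1 ≤ D) (hR : Reach adjacency source D target)
    (hmin : ∀ m, 1 ≤ m → m < D → ¬ Reach adjacency source m target) :
    ∀ (fuel : Nat) (front : List Int) (vis : PySem.Set Int) (n : Nat),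
    n < D →
    (∀ x, x ∈ vis ↔ ∃ m < n, Reach adjacency source m x) →
    (∀ x ∈ front, Reach adjacency source n x) →
    (∀ x, DistW adjacency source n x → x ∈ front) →
    D ≤ n + fuel →
    loopM target adjacency fuel front vis (n : Int) = (D : Int) := by
  -- the witness decomposition of the first hit: a node at exact distance D-1 adjacent to target
  have hchainD : ∃ y g, DistW adjacency source (D - 1) y ∧ g ∈ adjacency ∧
      target = PySem.Int.bxor y g := by
    obtain ⟨D', rfl⟩ : ∃ D', D = D' + 1 := ⟨D - 1, by omega⟩
    obtain ⟨y, g, hy, hg, ht⟩ := hR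
    obtain ⟨m, hm, hdy⟩ := exists_dist _ y hy
    have hmD : m = D' := by
      by_contra hne'
      exact hmin (m + 1) (by omega) (by omega) ⟨y, g, hdy.1, hg, ht⟩
    subst hmD
    exact ⟨y, g, hdy, hg, ht⟩
  obtain ⟨ytop, gtop, hytop, hgtop, httop⟩ := hchainD
  intro fuel
  induction fuel with
  | zero =>
    intro front vis n hnD hvis hf1 hf2 hfuel
    omega
  | succ f ih =>
    intro front vis n hnD hvis hf1 hf2 hfuel
    obtain ⟨zn, hzn⟩ := dist_chain (D - 1) ytop hytop n (by omega)
    have hznf : zn ∈ front := hf2 zn hzn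
    obtain ⟨c, rest, rfl⟩ : ∃ c rest, front = c :: rest := by
      cases front with
      | nil => simp at hznf
      | cons c r => exact ⟨c, r, rfl⟩
    simp only [loopM]
    rcases hlg : levelGo target adjacency (n : Int) (c :: rest) vis [] with v | ⟨vis', nf⟩ <;>
      dsimp only
    · obtain ⟨hv, y, hyf, g, hg, hyt⟩ := levelGo_inl_char _ _ _ _ hlg
      have hRn1 : Reach adjacency source (n + 1) target := ⟨y, g, hf1 y hyf, hg, hyt.symm⟩
      have hD : n + 1 = D := by
        by_contra hne'
        exact hmin (n + 1) (by omega) (by omega) hRn1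
      rw [hv, ← hD]
      push_cast
      ring
    · have hnhit : ¬ Reach adjacency source (n + 1) target := by
        intro hRn1
        have hD : n + 1 = D := by
          by_contra hne'
          exact hmin (n + 1) (by omega) (by omega) hRn1
        have hn' : D - 1 = n := by omega
        rw [hn'] at hytop
        have hyfr : ytop ∈ c :: rest := hf2 ytop hytop
        have hyvis' : ytop ∈ vis' := (levelGo_inr_vis _ _ _ _ _ hlg ytop).mpr (Or.inr hyfr)
        have hynv : ytop ∉ vis := by
          intro hm
          obtain ⟨m, hmn, hrm⟩ := (hvis ytop).mp hm
          exact hytop.2 m hmn hrm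
        exact levelGo_inr_nohit _ _ _ _ _ hlg ytop hyvis' hynv gtop hgtop httop.symm
      have hn1D : n + 1 < D := by
        rcases Nat.lt_or_ge (n + 1) D with h' | h'
        · exact h'
        · have : n + 1 = D := by omega
          exact absurd (this ▸ hR) hnhit
      have hvis' : ∀ x, x ∈ vis' ↔ ∃ m < n + 1, Reach adjacency source m x := by
        intro x
        rw [levelGo_inr_vis _ _ _ _ _ hlg x]
        constructor
        · rintro (hx | hx)
          · obtain ⟨m, hm, hr⟩ := (hvis x).mp hx
            exact ⟨m, by omega, hr⟩
          · exact ⟨n, by omega, hf1 x hx⟩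
        · rintro ⟨m, hm, hr⟩
          obtain ⟨m0, hm0, hd0⟩ := exists_dist m x hr
          rcases Nat.lt_or_ge m0 n with h0 | h0
          · exact Or.inl ((hvis x).mpr ⟨m0, h0, hd0.1⟩)
          · have : m0 = n := by omega
            subst this
            exact Or.inr (hf2 x hd0)
      have hf1' : ∀ x ∈ nf, Reach adjacency source (n + 1) x := by
        intro x hx
        rcases levelGo_inr_upper _ _ _ _ _ hlg x hx with h0 | ⟨y, hy, g, hg, rfl⟩
        · simp at h0
        · exact ⟨y, g, hf1 y hy, hg, rfl⟩
      have hf2' : ∀ x, DistW adjacency source (n + 1) x → x ∈ nf := by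
        intro w hw
        obtain ⟨y, g, hy, hg, rfl⟩ := dist_pred hw
        have hyfr : y ∈ c :: rest := hf2 y hy
        have hyvis' : y ∈ vis' := (levelGo_inr_vis _ _ _ _ _ hlg y).mpr (Or.inr hyfr)
        have hynv : y ∉ vis := by
          intro hm
          obtain ⟨m, hmn, hrm⟩ := (hvis y).mp hm
          exact hy.2 m hmn hrm
        refine levelGo_inr_collect (fun z => ∃ m ≤ n, Reach adjacency source m z) _ _ _ _ _
          ?_ ?_ hlg y hyvis' hynv g hg ?_
        · intro x hx
          obtain ⟨m, hm, hr⟩ := (hvis x).mp hx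
          exact ⟨m, by omega, hr⟩
        · intro x hx
          exact ⟨n, le_refl n, hf1 x hx⟩
        · rintro ⟨m, hm, hr⟩
          exact hw.2 m (by omega) hr
      have hrec := ih nf vis' (n + 1) hn1D hvis' hf1' hf2' (by omega)
      have hcast : ((n : Int) + 1) = ((n + 1 : Nat) : Int) := by push_cast; ring
      rw [hcast]
      exact hrec

theorem loopM_unreach {target : Int} {adjacency : List Int} {source : Int}
    (hNR : ∀ m, 1 ≤ m → ¬ Reach adjacency source m target)
    (hadj : ∀ a ∈ adjacency, In32 a) :
    ∀ (fuel : Nat) (front : List Int) (vis : PySem.Set Int) (n : Nat),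
    (∀ x ∈ front, Reach adjacency source n x) →
    (∀ x ∈ front, In32 x) →
    cnt vis < fuel →
    loopM target adjacency fuel front vis (n : Int) = -1 := by
  intro fuel
  induction fuel with
  | zero =>
    intro front vis n _ _ h
    omega
  | succ f ih =>
    intro front vis n hf1 hf32 hcnt
    cases front with
    | nil => exact loopM_nil _ _ _ _ _
    | cons c rest =>
      simp only [loopM]
      rcases hlg : levelGo target adjacency (n : Int) (c :: rest) vis [] with v | ⟨vis', nf⟩ <;>
        dsimp only
      · obtain ⟨hv, y, hyf, g, hg, hyt⟩ := levelGo_inl_char _ _ _ _ hlg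
        exact absurd ⟨y, g, hf1 y hyf, hg, hyt.symm⟩ (hNR (n + 1) (by omega))
      · obtain ⟨h32', hlen, hcase⟩ := levelGo_inr (c :: rest) vis [] vis' nf hf32 hadj (by simp) hlg
        have hf1' : ∀ x ∈ nf, Reach adjacency source (n + 1) x := by
          intro x hx
          rcases levelGo_inr_upper _ _ _ _ _ hlg x hx with h0 | ⟨y, hy, g, hg, rfl⟩
          · simp at h0
          · exact ⟨y, g, hf1 y hy, hg, rfl⟩
        rcases hcase with hlt | ⟨rfl, rfl⟩
        · have hrec := ih nf vis' (n + 1) hf1' h32' (by omega)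
          have hcast : ((n : Int) + 1) = ((n + 1 : Nat) : Int) := by push_cast; ring
          rw [hcast]
          exact hrec
        · exact loopM_nil _ _ _ _ _

-- ---- B-side lemmas ----
theorem mem_nextSet {adjacency : List Int} {cur : PySem.Set Int} {x : Int} :
    x ∈ nextSet (PySem.Set.ofList adjacency) cur ↔
      ∃ y ∈ cur, ∃ g ∈ adjacency, x = PySem.Int.bxor y g := by
  unfold nextSet
  rw [PySem.Set.mem_ofList, List.mem_flatMap]
  constructor
  · rintro ⟨y, hy, hx⟩
    rw [List.mem_map] at hx
    obtain ⟨g, hg, rfl⟩ := hx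
    exact ⟨y, hy, g, (PySem.Set.mem_ofList _ _).mp hg, rfl⟩
  · rintro ⟨y, hy, g, hg, rfl⟩
    exact ⟨y, hy, List.mem_map.mpr ⟨g, (PySem.Set.mem_ofList _ _).mpr hg, rfl⟩⟩

def plen : Option (List Int) → Nat
  | none => 0
  | some p => p.length

theorem loopB_reach {adjacency : List Int} {t : Int} {D : Nat}
    (hD1 : 1 ≤ D) (hR : Reach adjacency 0 D t)
    (hmin : ∀ m, 1 ≤ m → m < D → ¬ Reach adjacency 0 m t)
    (h32g : ∀ g ∈ adjacency, In32 g) (hne : adjacency ≠ []) :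
    ∀ (fuel : Nat) (prev : Option (PySem.Set Int)) (cur : PySem.Set Int) (n : Nat),
    cur.Nodup →
    (∀ x, x ∈ cur ↔ Reach adjacency 0 n x) →
    (match prev with
     | none => n = 0
     | some p => 1 ≤ n ∧ p.Nodup ∧ (∀ x, x ∈ p ↔ Reach adjacency 0 (n - 1) x)) →
    n < D →
    2 ^ 34 + 5 ≤ fuel + plen prev + cur.length + (if prev.isSome then 1 else 0) →
    loopB t (PySem.Set.ofList adjacency) fuel prev cur (n : Int) = (D : Int) := by
  intro fuel
  induction fuel with
  | zero =>
    intro prev cur n hnd hcur hprev hnD hfuel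
    exfalso
    have hcl : cur.length ≤ 2 ^ 33 :=
      nodup_in32_length hnd (fun x hx => reach_in32 h32g n x ((hcur x).mp hx))
    rcases prev with _ | p
    · simp [plen] at hfuel
      omega
    · obtain ⟨hn1, hpnd, hpspec⟩ := hprev
      have hpl : p.length ≤ 2 ^ 33 :=
        nodup_in32_length hpnd (fun x hx => reach_in32 h32g (n - 1) x ((hpspec x).mp hx))
      simp [plen] at hfuel
      omega
  | succ f ih =>
    intro prev cur n hnd hcur hprev hnD hfuel
    obtain ⟨g0, hg0⟩ : ∃ g0, g0 ∈ adjacency := by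
      cases adjacency with
      | nil => exact absurd rfl hne
      | cons a l => exact ⟨a, by simp⟩
    have hnxt : ∀ x, x ∈ nextSet (PySem.Set.ofList adjacency) cur ↔ Reach adjacency 0 (n + 1) x := by
      intro x
      rw [mem_nextSet]
      constructor
      · rintro ⟨y, hy, g, hg, rfl⟩
        exact ⟨y, g, (hcur y).mp hy, hg, rfl⟩
      · rintro ⟨y, g, hy, hg, rfl⟩
        exact ⟨y, (hcur y).mpr hy, g, hg, rfl⟩
    have hnxtnd : (nextSet (PySem.Set.ofList adjacency) cur).Nodup := PySem.Set.nodup_ofList _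
    simp only [loopB]
    by_cases hhit : PySem.Set.contains (nextSet (PySem.Set.ofList adjacency) cur) t = true
    · have htr : Reach adjacency 0 (n + 1) t := (hnxt t).mp ((PySem.Set.contains_iff _ _).mp hhit)
      have hD : n + 1 = D := by
        by_contra hne'
        exact hmin (n + 1) (by omega) (by omega) htr
      rw [if_pos hhit, ← hD]
      push_cast
      ring
    · have hnhit : ¬ Reach adjacency 0 (n + 1) t := fun hr =>
        hhit ((PySem.Set.contains_iff _ _).mpr ((hnxt t).mpr hr))
      have hn1D : n + 1 < D := by
        rcases Nat.lt_or_ge (n + 1) D with h' | h'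
        · exact h'
        · exact absurd ((by omega : n + 1 = D) ▸ hR) hnhit
      rw [if_neg hhit]
      rcases prev with _ | p
      · obtain rfl : n = 0 := hprev
        rw [if_neg (by simp)]
        have hrec := ih (some cur) (nextSet (PySem.Set.ofList adjacency) cur) 1 hnxtnd
          (fun x => hnxt x) ⟨by omega, hnd, fun x => hcur x⟩ (by omega)
          (by simp [plen] at hfuel ⊢; omega)
        simpa using hrec
      · obtain ⟨hn1, hpnd, hpspec⟩ := hprev
        have heqf : PySem.Set.equal (nextSet (PySem.Set.ofList adjacency) cur) p = false := by
          by_contra hbe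
          have heq : PySem.Set.equal (nextSet (PySem.Set.ofList adjacency) cur) p = true := by
            cases hEE : PySem.Set.equal (nextSet (PySem.Set.ofList adjacency) cur) p
            · exact absurd hEE hbe
            · rfl
          have hmemiff := (PySem.Set.equal_iff _ _).mp heq
          have hper : ∀ x, Reach adjacency 0 ((n - 1) + 2) x ↔ Reach adjacency 0 (n - 1) x := by
            intro x
            have h1 : (n - 1) + 2 = n + 1 := by omega
            rw [h1]
            exact Iff.trans (Iff.symm (hnxt x)) (Iff.trans (hmemiff x) (hpspec x))
          rcases reach_descend hper D t (by omega) hR with hlow | hlow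
          · have : Reach adjacency 0 ((n - 1) + 2) t := (hper t).mpr hlow
            rw [(by omega : (n - 1) + 2 = n + 1)] at this
            exact hnhit this
          · have h2 : (n - 1) + 1 = n := by omega
            rw [h2] at hlow
            exact hmin n (by omega) (by omega) hlow
        rw [if_neg (by simp [heqf])]
        have hsubp : ∀ x ∈ p, x ∈ nextSet (PySem.Set.ofList adjacency) cur := by
          intro x hx
          have hr2 : Reach adjacency 0 ((n - 1) + 2) x := reach_succ_succ hg0 ((hpspec x).mp hx)
          rw [(by omega : (n - 1) + 2 = n + 1)] at hr2
          exact (hnxt x).mpr hr2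
        obtain ⟨w, hwn, hwp⟩ : ∃ w, w ∈ nextSet (PySem.Set.ofList adjacency) cur ∧ w ∉ p := by
          by_contra hno
          push_neg at hno
          have : PySem.Set.equal (nextSet (PySem.Set.ofList adjacency) cur) p = true :=
            (PySem.Set.equal_iff _ _).mpr (fun x => ⟨fun hx => hno x hx, fun hx => hsubp x hx⟩)
          rw [this] at heqf
          simp at heqf
        have hgrow : p.length + 1 ≤ (nextSet (PySem.Set.ofList adjacency) cur).length := by
          have hndw : (w :: p).Nodup := List.nodup_cons.mpr ⟨hwp, hpnd⟩
          have hsubw : (w :: p).toFinset ⊆ (nextSet (PySem.Set.ofList adjacency) cur).toFinset := by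
            intro z hz
            rw [List.mem_toFinset] at hz ⊢
            rcases List.mem_cons.mp hz with rfl | hz'
            · exact hwn
            · exact hsubp z hz'
          have hcard := Finset.card_le_card hsubw
          rw [List.toFinset_card_of_nodup hndw, List.toFinset_card_of_nodup hnxtnd] at hcard
          simpa using hcard
        have hrec := ih (some cur) (nextSet (PySem.Set.ofList adjacency) cur) (n + 1) hnxtnd
          (fun x => hnxt x) ⟨by omega, hnd, fun x => hcur x⟩ (by omega)
          (by simp [plen] at hfuel ⊢; omega)
        have hcast : (n : Int) + 1 = ((n + 1 : Nat) : Int) := by push_cast; ring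
        rw [hcast]
        exact hrec

theorem loopB_unreach {adjacency : List Int} {t : Int}
    (hNR : ∀ m, 1 ≤ m → ¬ Reach adjacency 0 m t)
    (h32g : ∀ g ∈ adjacency, In32 g) (hne : adjacency ≠ []) :
    ∀ (fuel : Nat) (prev : Option (PySem.Set Int)) (cur : PySem.Set Int) (n : Nat),
    cur.Nodup →
    (∀ x, x ∈ cur ↔ Reach adjacency 0 n x) →
    (match prev with
     | none => n = 0
     | some p => 1 ≤ n ∧ p.Nodup ∧ (∀ x, x ∈ p ↔ Reach adjacency 0 (n - 1) x)) →
    2 ^ 34 + 5 ≤ fuel + plen prev + cur.length + (if prev.isSome then 1 else 0) →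
    loopB t (PySem.Set.ofList adjacency) fuel prev cur (n : Int) = -1 := by
  intro fuel
  induction fuel with
  | zero =>
    intro prev cur n hnd hcur hprev hfuel
    exfalso
    have hcl : cur.length ≤ 2 ^ 33 :=
      nodup_in32_length hnd (fun x hx => reach_in32 h32g n x ((hcur x).mp hx))
    rcases prev with _ | p
    · simp [plen] at hfuel
      omega
    · obtain ⟨hn1, hpnd, hpspec⟩ := hprev
      have hpl : p.length ≤ 2 ^ 33 :=
        nodup_in32_length hpnd (fun x hx => reach_in32 h32g (n - 1) x ((hpspec x).mp hx))
      simp [plen] at hfuel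
      omega
  | succ f ih =>
    intro prev cur n hnd hcur hprev hfuel
    obtain ⟨g0, hg0⟩ : ∃ g0, g0 ∈ adjacency := by
      cases adjacency with
      | nil => exact absurd rfl hne
      | cons a l => exact ⟨a, by simp⟩
    have hnxt : ∀ x, x ∈ nextSet (PySem.Set.ofList adjacency) cur ↔ Reach adjacency 0 (n + 1) x := by
      intro x
      rw [mem_nextSet]
      constructor
      · rintro ⟨y, hy, g, hg, rfl⟩
        exact ⟨y, g, (hcur y).mp hy, hg, rfl⟩
      · rintro ⟨y, g, hy, hg, rfl⟩
        exact ⟨y, (hcur y).mpr hy, g, hg, rfl⟩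
    have hnxtnd : (nextSet (PySem.Set.ofList adjacency) cur).Nodup := PySem.Set.nodup_ofList _
    simp only [loopB]
    have hhit : ¬ PySem.Set.contains (nextSet (PySem.Set.ofList adjacency) cur) t = true := by
      intro hc
      exact hNR (n + 1) (by omega) ((hnxt t).mp ((PySem.Set.contains_iff _ _).mp hc))
    rw [if_neg hhit]
    rcases prev with _ | p
    · obtain rfl : n = 0 := hprev
      rw [if_neg (by simp)]
      have hrec := ih (some cur) (nextSet (PySem.Set.ofList adjacency) cur) 1 hnxtnd
        (fun x => hnxt x) ⟨by omega, hnd, fun x => hcur x⟩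
        (by simp [plen] at hfuel ⊢; omega)
      simpa using hrec
    · obtain ⟨hn1, hpnd, hpspec⟩ := hprev
      by_cases heq : PySem.Set.equal (nextSet (PySem.Set.ofList adjacency) cur) p = true
      · rw [if_pos heq]
      · have heqf : PySem.Set.equal (nextSet (PySem.Set.ofList adjacency) cur) p = false := by
          cases hEE : PySem.Set.equal (nextSet (PySem.Set.ofList adjacency) cur) p
          · rfl
          · exact absurd hEE heq
        rw [if_neg (by simp [heqf])]
        have hsubp : ∀ x ∈ p, x ∈ nextSet (PySem.Set.ofList adjacency) cur := by
          intro x hx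
          have hr2 : Reach adjacency 0 ((n - 1) + 2) x := reach_succ_succ hg0 ((hpspec x).mp hx)
          rw [(by omega : (n - 1) + 2 = n + 1)] at hr2
          exact (hnxt x).mpr hr2
        obtain ⟨w, hwn, hwp⟩ : ∃ w, w ∈ nextSet (PySem.Set.ofList adjacency) cur ∧ w ∉ p := by
          by_contra hno
          push_neg at hno
          exact heq ((PySem.Set.equal_iff _ _).mpr
            (fun x => ⟨fun hx => hno x hx, fun hx => hsubp x hx⟩))
        have hgrow : p.length + 1 ≤ (nextSet (PySem.Set.ofList adjacency) cur).length := by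
          have hndw : (w :: p).Nodup := List.nodup_cons.mpr ⟨hwp, hpnd⟩
          have hsubw : (w :: p).toFinset ⊆ (nextSet (PySem.Set.ofList adjacency) cur).toFinset := by
            intro z hz
            rw [List.mem_toFinset] at hz ⊢
            rcases List.mem_cons.mp hz with rfl | hz'
            · exact hwn
            · exact hsubp z hz'
          have hcard := Finset.card_le_card hsubw
          rw [List.toFinset_card_of_nodup hndw, List.toFinset_card_of_nodup hnxtnd] at hcard
          simpa using hcard
        have hrec := ih (some cur) (nextSet (PySem.Set.ofList adjacency) cur) (n + 1) hnxtnd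
          (fun x => hnxt x) ⟨by omega, hnd, fun x => hcur x⟩
          (by simp [plen] at hfuel ⊢; omega)
        have hcast : (n : Int) + 1 = ((n + 1 : Nat) : Int) := by push_cast; ring
        rw [hcast]
        exact hrec

-- ---- assembly ----
theorem bfs_empty (target source : Int) : bfs target [] source = -1 := by
  have hstep : ∀ f : Nat, loopA target [] (f + 1) [((0 : Int), source)] PySem.Set.empty = -1 := by
    intro f
    have hc : PySem.Set.contains (PySem.Set.empty : PySem.Set Int) source = false := by
      simp [PySem.Set.empty]
    simp only [loopA, scanA, hc, Bool.false_eq_true, if_false]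
    simpa using loopA_nil target [] f (PySem.Set.add PySem.Set.empty source)
  unfold bfs
  have h2 : (2 : Nat) ^ 33 * (([] : List Int).length + 1) + 1 = 2 ^ 33 + 1 := by norm_num
  rw [h2]
  exact hstep (2 ^ 33)

theorem bfs_eq_loopM {target : Int} {adjacency : List Int} {source : Int}
    (hadj : ∀ a ∈ adjacency, In32 a) (hsrc : In32 source)
    (fB : Nat) (hfB : 2 ^ 33 < fB) :
    bfs target adjacency source = loopM target adjacency fB [source] PySem.Set.empty 0 := by
  unfold bfs
  have h0 : [((0 : Int), source)] = ([source]).map (fun c => ((0 : Int), c)) := by simp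
  rw [h0]
  apply loopA_eq_loopM target adjacency hadj
  · intro x hx
    simp at hx
    subst hx
    exact hsrc
  · have hm : cnt (@PySem.Set.empty Int) * (adjacency.length + 1)
        ≤ 2 ^ 33 * (adjacency.length + 1) :=
      Nat.mul_le_mul_right _ (cnt_le _)
    simp only [List.length_cons, List.length_nil]
    omega
  · have := cnt_le (@PySem.Set.empty Int)
    omega

-- ===== VERDICT (by name: the statement is the Claim_ definition above) =====
theorem bfs_spec : Claim_equal_bfs := by
  intro target adjacency source hdom
  unfold Spec_bfs
  simp only [Dom_bfs, Bool.and_eq_true, List.all_eq_true] at hdom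
  obtain ⟨⟨htD, hadjD⟩, hsD⟩ := hdom
  have hadj : ∀ a ∈ adjacency, In32 a := fun a ha => dom_in32 (hadjD a ha)
  have hsrc : In32 source := dom_in32 hsD
  rcases eq_or_ne adjacency [] with rfl | hne
  · rw [bfs_empty]
    rfl
  · have hofne : PySem.Set.ofList adjacency ≠ [] := by
      intro h
      cases adjacency with
      | nil => exact hne rfl
      | cons a l =>
        have hmem : a ∈ PySem.Set.ofList (a :: l) := (PySem.Set.mem_ofList _ _).mpr (by simp)
        rw [h] at hmem
        simp at hmem
    have hBdef : bfs_alt target adjacency source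
        = loopB (PySem.Int.bxor target source) (PySem.Set.ofList adjacency) (2 ^ 34 + 4) none
            (PySem.Set.ofList [0]) 0 := by
      unfold bfs_alt
      rw [if_neg hofne]
    have hcur0 : ∀ x, x ∈ PySem.Set.ofList [(0 : Int)] ↔ Reach adjacency 0 0 x := by
      intro x
      rw [PySem.Set.mem_ofList]
      show x ∈ [(0 : Int)] ↔ x = 0
      simp
    by_cases hreach : ∃ d, 1 ≤ d ∧ Reach adjacency 0 d (PySem.Int.bxor target source)
    · letI : DecidablePred (fun d => 1 ≤ d ∧ Reach adjacency 0 d (PySem.Int.bxor target source)) :=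
        fun _ => Classical.dec _
      obtain ⟨hD1, hDr⟩ := Nat.find_spec hreach
      have hmin : ∀ m, 1 ≤ m → m < Nat.find hreach →
          ¬ Reach adjacency 0 m (PySem.Int.bxor target source) :=
        fun m h1 h2 hr => Nat.find_min hreach h2 ⟨h1, hr⟩
      have hRA : Reach adjacency source (Nat.find hreach) target :=
        (reach_translate adjacency source (Nat.find hreach) target).mpr hDr
      have hminA : ∀ m, 1 ≤ m → m < Nat.find hreach → ¬ Reach adjacency source m target :=
        fun m h1 h2 hr => hmin m h1 h2 ((reach_translate adjacency source m target).mp hr)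
      have hA : bfs target adjacency source = ((Nat.find hreach : Nat) : Int) := by
        rw [bfs_eq_loopM hadj hsrc (2 ^ 33 + 1 + Nat.find hreach) (by omega)]
        have hres := loopM_reach hD1 hRA hminA (2 ^ 33 + 1 + Nat.find hreach) [source]
          PySem.Set.empty 0 (by omega) ?_ ?_ ?_ (by omega)
        · simpa using hres
        · intro x
          constructor
          · intro hx
            simp [PySem.Set.empty] at hx
          · rintro ⟨m, hm, _⟩
            omega
        · intro x hx
          simp at hx
          subst hx
          rfl
        · intro x hd
          have hx : x = source := hd.1
          simp [hx]
      have hB : bfs_alt target adjacency source = ((Nat.find hreach : Nat) : Int) := by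
        rw [hBdef]
        have hres := loopB_reach hD1 hDr hmin hadj hne (2 ^ 34 + 4) none
          (PySem.Set.ofList [0]) 0 (PySem.Set.nodup_ofList _) hcur0 rfl (by omega)
          (by have h1 : (PySem.Set.ofList [(0 : Int)]).length = 1 := rfl; simp [plen, h1])
        simpa using hres
      rw [hA, hB]
    · have hNR : ∀ m, 1 ≤ m → ¬ Reach adjacency 0 m (PySem.Int.bxor target source) :=
        fun m h1 hr => hreach ⟨m, h1, hr⟩
      have hNRA : ∀ m, 1 ≤ m → ¬ Reach adjacency source m target :=
        fun m h1 hr => hNR m h1 ((reach_translate adjacency source m target).mp hr)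
      have hA : bfs target adjacency source = -1 := by
        rw [bfs_eq_loopM hadj hsrc (2 ^ 33 + 1) (by omega)]
        have hres := loopM_unreach hNRA hadj (2 ^ 33 + 1) [source] PySem.Set.empty 0
          ?_ ?_ ?_
        · simpa using hres
        · intro x hx
          simp at hx
          subst hx
          rfl
        · intro x hx
          simp at hx
          subst hx
          exact hsrc
        · have := cnt_le (@PySem.Set.empty Int)
          omega
      have hB : bfs_alt target adjacency source = -1 := by
        rw [hBdef]
        have hres := loopB_unreach hNR hadj hne (2 ^ 34 + 4) none
          (PySem.Set.ofList [0]) 0 (PySem.Set.nodup_ofList _) hcur0 rfl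
          (by have h1 : (PySem.Set.ofList [(0 : Int)]).length = 1 := rfl; simp [plen, h1])
        simpa using hres
      rw [hA, hB]
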